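-- pv_equiv track=rewrite | github.com/VedantProject/AI-BASED-SYNTAX-ERROR-CLASSIFIER | self_heal/healer.py | _ranked_candidates
-- ===== SOURCE A (Python) =====
-- from typing import List, Optional, Tuple
--
-- def _levenshtein(a: str, b: str) -> int:
--     if a == b:
--         return 0
--     la, lb = len(a), len(b)
--     if la == 0: return lb
--     if lb == 0: return la
--     prev = list(range(lb + 1))
--     for i, ca in enumerate(a, 1):
--         curr = [i] + [0] * lb
--         for j, cb in enumerate(b, 1):
--             curr[j] = min(prev[j] + 1, curr[j-1] + 1, prev[j-1] + (ca != cb))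
--         prev = curr
--     return prev[lb]
--
-- def _ranked_candidates(name: str,
--                         candidates,
--                         max_dist: int = 3,
--                         n: int = 5) -> List[Tuple[int, str]]:
--     """
--     Return up to *n* (distance, candidate) pairs sorted by distance,
--     filtered to max_dist.  Case-insensitive distance; original case returned.
--     """
--     scored = []
--     nl = name.lower()
--     for c in candidates:
--         d = _levenshtein(nl, c.lower())
--         if d <= max_dist:
--             scored.append((d, c))
--     scored.sort(key=lambda x: x[0])
--     return scored[:n]
-- ===== SOURCE B (Python) =====
-- from typing import List, Tuple
--
-- def _capped_distance(a: str, b: str, cap: int) -> int: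
--     """Levenshtein distance, except that any value > cap may be reported as cap+1.
--     Prunes: length-difference pretest and early exit once a whole DP row exceeds cap."""
--     la, lb = len(a), len(b)
--     if la - lb > cap or lb - la > cap:
--         return cap + 1
--     prev = list(range(lb + 1))
--     for ca in a:
--         left = prev[0] + 1
--         row = [left]
--         diag = prev[0]
--         for cb, up in zip(b, prev[1:]):
--             left = min(up + 1, left + 1, diag + (ca != cb))
--             row.append(left)
--             diag = up
--         if min(row) > cap:
--             return cap + 1
--         prev = row
--     return prev[-1]
--
-- def _ranked_candidates(name: str,
--                         candidates,
--                         max_dist: int = 3,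
--                         n: int = 5) -> List[Tuple[int, str]]:
--     nl = name.lower()
--     scored = sorted(((d, c) for c in candidates
--                      if (d := _capped_distance(nl, c.lower(), max_dist)) <= max_dist),
--                     key=lambda t: t[0])
--     return scored[:n]
-- ===== Notes on version B (the rewrite author's own statement) =====
-- stated objective: faster
-- what changed: B replaces A's always-full Levenshtein DP (plus sort of an appended list) by a threshold-pruned (Ukkonen-style) distance: an O(1) length-difference pretest and an early exit as soon as a whole DP row's minimum exceeds max_dist, reporting max_dist+1 for any candidate farther than the threshold; rows are built by a forward scan carrying left/diag instead of index assignment into a preallocated list.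
import Mathlib
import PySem

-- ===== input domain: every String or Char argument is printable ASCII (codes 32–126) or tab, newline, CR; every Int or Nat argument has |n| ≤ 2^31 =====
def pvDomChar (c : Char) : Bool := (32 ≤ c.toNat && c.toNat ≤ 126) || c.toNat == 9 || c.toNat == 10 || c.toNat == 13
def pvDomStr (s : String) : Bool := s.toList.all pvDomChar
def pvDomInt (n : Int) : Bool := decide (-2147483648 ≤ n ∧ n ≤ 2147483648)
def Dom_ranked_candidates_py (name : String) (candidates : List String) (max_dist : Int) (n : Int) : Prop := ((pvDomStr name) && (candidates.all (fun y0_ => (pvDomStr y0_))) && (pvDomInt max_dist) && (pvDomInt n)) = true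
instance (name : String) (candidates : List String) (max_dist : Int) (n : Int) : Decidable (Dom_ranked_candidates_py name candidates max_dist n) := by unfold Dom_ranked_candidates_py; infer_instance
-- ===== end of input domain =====

-- B replaces A's always-full Levenshtein DP by a threshold-pruned distance (length-difference
-- pretest + early exit when a whole DP row exceeds max_dist); equal output is proved on Dom.


-- ===== PORT A =====
-- _levenshtein(a, b): full two-row DP; curr is a preallocated list mutated by index.
def pyLev_a (a b : List Char) : Int :=
  if a = b then 0
  else
    let la : Int := a.length
    let lb : Int := b.length
    if la = 0 then lb
    else if lb = 0 then la
    else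
      let prev :=
        (PySem.List.enumerate a 1).foldl (fun prev ica =>
          (PySem.List.enumerate b 1).foldl (fun curr jcb =>
            PySem.List.pySetD curr jcb.1
              (min (PySem.List.pyGetD prev jcb.1 0 + 1)
                (min (PySem.List.pyGetD curr (jcb.1 - 1) 0 + 1)
                  (PySem.List.pyGetD prev (jcb.1 - 1) 0 + (if ica.2 ≠ jcb.2 then 1 else 0)))))
            (ica.1 :: List.replicate b.length 0))
          (PySem.List.pyRange 0 (lb + 1) 1)
      PySem.List.pyGetD prev lb 0

def ranked_candidates_py (name : String) (candidates : List String) (max_dist : Int) (n : Int) : List (Int × String) :=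
  let nl := PySem.Str.lower name
  let scored := candidates.foldl (fun scored c =>
    let d := pyLev_a nl.toList (PySem.Str.lower c).toList
    if d ≤ max_dist then scored ++ [(d, c)] else scored) []
  PySem.List.slice (PySem.List.sorted scored (fun x => x.1) false) none (some n)

-- ===== PORT B =====
-- inner 'for cb, up in zip(b, prev[1:])' loop of _capped_distance: scan carrying left/diag.
def pyRowScan (ca : Char) : Int → Int → List Char → List Int → List Int
  | left, diag, cb :: bs, up :: ups =>
      let v := min (up + 1) (min (left + 1) (diag + (if ca ≠ cb then 1 else 0)))
      v :: pyRowScan ca v up bs ups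
  | _, _, _, _ => []

-- 'for ca in a' loop of _capped_distance with the min(row) > cap early exit.
def pyLevLoop (cap : Int) (b : List Char) : List Char → List Int → Int
  | [], prev => PySem.List.pyGetD prev (-1) 0
  | ca :: rest, prev =>
      let h := PySem.List.pyGetD prev 0 0
      let t := pyRowScan ca (h + 1) h b prev.tail
      if t.foldl min (h + 1) > cap then cap + 1
      else pyLevLoop cap b rest ((h + 1) :: t)

def pyLev_b (a b : List Char) (cap : Int) : Int :=
  let la : Int := a.length
  let lb : Int := b.length
  if la - lb > cap ∨ lb - la > cap then cap + 1
  else pyLevLoop cap b a (PySem.List.pyRange 0 (lb + 1) 1)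

def ranked_candidates_py_alt (name : String) (candidates : List String) (max_dist : Int) (n : Int) : List (Int × String) :=
  let nl := PySem.Str.lower name
  let scored := PySem.List.sorted
    (candidates.filterMap (fun c =>
      let d := pyLev_b nl.toList (PySem.Str.lower c).toList max_dist
      if d ≤ max_dist then some (d, c) else none))
    (fun t => t.1) false
  PySem.List.slice scored none (some n)

-- ===== PRECONDITION & SPEC =====
def Spec_ranked_candidates_py (name : String) (candidates : List String) (max_dist : Int) (n : Int) (out : List (Int × String)) : Prop := out = ranked_candidates_py_alt name candidates max_dist n
instance (name : String) (candidates : List String) (max_dist : Int) (n : Int) (out : List (Int × String)) : Decidable (Spec_ranked_candidates_py name candidates max_dist n out) := by unfold Spec_ranked_candidates_py; infer_instance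

-- ===== CLAIM (what is proved, stated in full; the proofs are below) =====
def Claim_equal_ranked_candidates_py : Prop := ∀ (name : String) (candidates : List String) (max_dist : Int) (n : Int), Dom_ranked_candidates_py name candidates max_dist n → Spec_ranked_candidates_py name candidates max_dist n (ranked_candidates_py name candidates max_dist n)

-- ===== LEMMAS AND PROOFS =====

-- Reference edit distance (front recursion) and its snoc form.
def levN : List Char → List Char → Int
  | [], b => b.length
  | _ :: a, [] => a.length + 1
  | x :: a, y :: b =>
      min (levN a (y :: b) + 1)
        (min (levN (x :: a) b + 1) (levN a b + (if x ≠ y then 1 else 0)))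
termination_by a b => a.length + b.length
decreasing_by all_goals simp [List.length_cons] <;> omega

def Lsp (a b : List Char) : Int := levN a.reverse b.reverse

-- rowL a q b' = the DP row for left word a over prefixes of b extending q:
-- entries Lsp a (q ++ b'.take j), j = 0 .. b'.length.
def rowL (a : List Char) : List Char → List Char → List Int
  | q, [] => [Lsp a q]
  | q, cb :: bs => Lsp a q :: rowL a (q ++ [cb]) bs

def rowLT (a q : List Char) : List Char → List Int
  | [] => []
  | cb :: bs => rowL a (q ++ [cb]) bs

theorem rowL_eq (a q b' : List Char) : rowL a q b' = Lsp a q :: rowLT a q b' := by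
  cases b' <;> rfl

theorem levN_nonneg (a b : List Char) : 0 ≤ levN a b := by
  fun_induction levN a b <;> (try split_ifs) <;> omega

theorem levN_self (a : List Char) : levN a a = 0 := by
  induction a with
  | nil => simp [levN]
  | cons x xs ih =>
    have h1 := levN_nonneg xs (x :: xs)
    have h2 := levN_nonneg (x :: xs) xs
    simp [levN, ih]
    omega

theorem levN_nil_right (a : List Char) : levN a [] = a.length := by
  cases a <;> simp [levN]

theorem levN_ge_sub (a b : List Char) :
    (a.length : Int) - b.length ≤ levN a b ∧ (b.length : Int) - a.length ≤ levN a b := by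
  fun_induction levN a b <;> (try simp only [List.length_cons, List.length_nil] at *) <;>
    (try split_ifs) <;> (try push_cast at *) <;> omega

theorem Lsp_nil_right (a : List Char) : Lsp a [] = a.length := by
  simp [Lsp, levN_nil_right]

theorem Lsp_nil_left (b : List Char) : Lsp [] b = b.length := by
  simp [Lsp, levN]

theorem Lsp_self (a : List Char) : Lsp a a = 0 := by
  simp [Lsp, levN_self]

theorem Lsp_snoc_snoc (a q : List Char) (c d : Char) :
    Lsp (a ++ [c]) (q ++ [d]) =
      min (Lsp a (q ++ [d]) + 1)
        (min (Lsp (a ++ [c]) q + 1) (Lsp a q + (if c ≠ d then 1 else 0))) := by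
  simp [Lsp, levN]

theorem rowL_getD (a : List Char) : ∀ (b' q : List Char) (j : Nat), j ≤ b'.length →
    (rowL a q b').getD j 0 = Lsp a (q ++ b'.take j) := by
  intro b'
  induction b' with
  | nil =>
    intro q j hj
    simp only [List.length_nil, Nat.le_zero] at hj
    subst hj
    simp [rowL]
  | cons cb bs ih =>
    intro q j hj
    cases j with
    | zero => simp [rowL]
    | succ j =>
      simp only [rowL, List.getD_cons_succ, List.take_succ_cons]
      rw [ih (q ++ [cb]) j (by simpa using hj)]
      simp

theorem rowL_getLastD (a : List Char) : ∀ (b' q : List Char) (d : Int),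
    (rowL a q b').getLastD d = Lsp a (q ++ b') := by
  intro b'
  induction b' with
  | nil => intro q d; simp [rowL]
  | cons cb bs ih =>
    intro q d
    rw [rowL, List.getLastD_cons, ih (q ++ [cb])]
    simp

theorem rowL_ne_nil (a q b' : List Char) : rowL a q b' ≠ [] := by
  cases b' <;> simp [rowL]

theorem rowL_snoc (a : List Char) : ∀ (b' q : List Char) (d : Char),
    rowL a q (b' ++ [d]) = rowL a q b' ++ [Lsp a (q ++ b' ++ [d])] := by
  intro b'
  induction b' with
  | nil => intro q d; simp [rowL]
  | cons cb bs ih =>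
    intro q d
    simp only [List.cons_append, rowL, ih (q ++ [cb]) d, List.append_assoc]
    simp

theorem rowL_nil_left : ∀ (b' q : List Char),
    rowL [] q b' = PySem.List.pyRange q.length (q.length + b'.length + 1) 1 := by
  intro b'
  induction b' with
  | nil =>
    intro q
    simp [rowL, Lsp_nil_left, PySem.List.pyRange_one_singleton]
  | cons cb bs ih =>
    intro q
    rw [rowL, PySem.List.pyRange_one_cons (by omega), ih (q ++ [cb])]
    congr 1
    · exact Lsp_nil_left q
    · congr 1 <;> simp only [List.length_append, List.length_cons, List.length_nil] <;> push_cast <;> ring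

theorem Lsp_mem_rowL (a : List Char) : ∀ (b' q : List Char), Lsp a (q ++ b') ∈ rowL a q b' := by
  intro b'
  induction b' with
  | nil => intro q; simp [rowL]
  | cons cb bs ih =>
    intro q
    rw [rowL]
    right
    simpa using ih (q ++ [cb])

-- each entry of the next row is ≥ any lower bound of the previous row
theorem length_rowL (a : List Char) : ∀ (b' q : List Char), (rowL a q b').length = b'.length + 1 := by
  intro b'
  induction b' with
  | nil => intro q; simp [rowL]
  | cons cb bs ih => intro q; simp [rowL, ih]

theorem rowmin_step (aa : List Char) (c : Char) (m : Int) :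
    ∀ (b' q : List Char), (∀ y ∈ rowL aa q b', m ≤ y) → m ≤ Lsp (aa ++ [c]) q →
      ∀ x ∈ rowL (aa ++ [c]) q b', m ≤ x := by
  intro b'
  induction b' with
  | nil =>
    intro q hprev hq x hx
    simp only [rowL, List.mem_singleton] at hx
    subst hx; exact hq
  | cons cb bs ih =>
    intro q hprev hq x hx
    rw [rowL] at hx
    rcases List.mem_cons.mp hx with h | h
    · subst h; exact hq
    · refine ih (q ++ [cb]) ?_ ?_ x h
      · intro y hy
        exact hprev y (by rw [rowL]; exact List.mem_cons_of_mem _ hy)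
      · have hrec := Lsp_snoc_snoc aa q c cb
        have h1 : m ≤ Lsp aa (q ++ [cb]) := by
          refine hprev _ ?_
          rw [rowL]
          exact List.mem_cons_of_mem _ (by rw [rowL_eq]; exact List.mem_cons_self ..)
        have h2 : m ≤ Lsp aa q := hprev _ (by rw [rowL]; exact List.mem_cons_self ..)
        split_ifs at hrec <;> omega

theorem rowmin_many (b : List Char) (m : Int) :
    ∀ (s p : List Char), (∀ y ∈ rowL p [] b, m ≤ y) → ∀ x ∈ rowL (p ++ s) [] b, m ≤ x := by
  intro s
  induction s with
  | nil => intro p h x hx; exact h x (by simpa using hx)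
  | cons c s ih =>
    intro p h x hx
    have h0 : m ≤ Lsp p [] := h _ (by rw [rowL_eq]; exact List.mem_cons_self ..)
    have hq : m ≤ Lsp (p ++ [c]) [] := by
      rw [Lsp_nil_right] at h0 ⊢
      simp only [List.length_append, List.length_cons, List.length_nil]
      push_cast at h0 ⊢
      omega
    have hrow := rowmin_step p c m b [] h hq
    refine ih (p ++ [c]) hrow x ?_
    simpa [List.append_assoc] using hx

-- the scan computes the tail of the next DP row
theorem rowScan_spec (aa : List Char) (ca : Char) :
    ∀ (b' q : List Char),
      pyRowScan ca (Lsp (aa ++ [ca]) q) (Lsp aa q) b' (rowLT aa q b') = rowLT (aa ++ [ca]) q b' := by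
  intro b'
  induction b' with
  | nil => intro q; rfl
  | cons cb bs ih =>
    intro q
    rw [rowLT, rowLT, rowL_eq aa (q ++ [cb]) bs, rowL_eq (aa ++ [ca]) (q ++ [cb]) bs]
    simp only [pyRowScan]
    rw [← Lsp_snoc_snoc aa q ca cb, ih (q ++ [cb])]

theorem loopB_spec (cap : Int) (b : List Char) :
    ∀ (as_ p : List Char),
      (pyLevLoop cap b as_ (rowL p [] b) ≤ cap → pyLevLoop cap b as_ (rowL p [] b) = Lsp (p ++ as_) b)
      ∧ (Lsp (p ++ as_) b ≤ cap → pyLevLoop cap b as_ (rowL p [] b) = Lsp (p ++ as_) b) := by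
  intro as_
  induction as_ with
  | nil =>
    intro p
    have hres : pyLevLoop cap b [] (rowL p [] b) = Lsp p b := by
      rw [pyLevLoop, PySem.List.pyGetD_neg_one _ _ (rowL_ne_nil p [] b)]
      have := rowL_getLastD p b [] 0
      rw [List.getLastD_eq_getLast?, List.getLast?_eq_some_getLast (rowL_ne_nil p [] b)] at this
      simpa using this
    simp only [List.append_nil]
    exact ⟨fun _ => hres, fun _ => hres⟩
  | cons ca rest ih =>
    intro p
    have hhead : PySem.List.pyGetD (rowL p [] b) 0 0 = Lsp p [] := by
      rw [rowL_eq]; exact PySem.List.pyGetD_zero_cons ..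
    have htail : (rowL p [] b).tail = rowLT p [] b := by rw [rowL_eq, List.tail_cons]
    have hleft : Lsp p [] + 1 = Lsp (p ++ [ca]) [] := by
      rw [Lsp_nil_right, Lsp_nil_right]
      simp only [List.length_append, List.length_cons, List.length_nil]
      push_cast
      ring
    have hscan : pyRowScan ca (Lsp p [] + 1) (Lsp p []) b ((rowL p [] b).tail)
        = rowLT (p ++ [ca]) [] b := by
      rw [htail, hleft]; exact rowScan_spec p ca b []
    have hrow : (Lsp p [] + 1) :: rowLT (p ++ [ca]) [] b = rowL (p ++ [ca]) [] b := by
      rw [rowL_eq (p ++ [ca]) [] b, hleft]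
    have hstep : pyLevLoop cap b (ca :: rest) (rowL p [] b) =
        if (rowLT (p ++ [ca]) [] b).foldl min (Lsp p [] + 1) > cap then cap + 1
        else pyLevLoop cap b rest (rowL (p ++ [ca]) [] b) := by
      rw [pyLevLoop, hhead, hscan, hrow]
    have hmle : ∀ y ∈ rowL (p ++ [ca]) [] b,
        (rowLT (p ++ [ca]) [] b).foldl min (Lsp p [] + 1) ≤ y := by
      intro y hy
      rw [← hrow] at hy
      rcases List.mem_cons.mp hy with h | h
      · subst h; exact (PySem.List.foldl_min_le _ _).1
      · exact (PySem.List.foldl_min_le _ _).2 y h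
    have happ : p ++ ca :: rest = (p ++ [ca]) ++ rest := by simp
    by_cases hgt : (rowLT (p ++ [ca]) [] b).foldl min (Lsp p [] + 1) > cap
    · have hbig : cap < Lsp (p ++ ca :: rest) b := by
        have hmem : Lsp ((p ++ [ca]) ++ rest) b ∈ rowL ((p ++ [ca]) ++ rest) [] b := by
          simpa using Lsp_mem_rowL ((p ++ [ca]) ++ rest) b []
        have := rowmin_many b _ rest (p ++ [ca]) hmle _ hmem
        rw [happ]
        omega
      rw [hstep, if_pos hgt]
      exact ⟨fun h => absurd h (by omega), fun h => absurd h (by omega)⟩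
    · rw [hstep, if_neg hgt, happ]
      exact ih (p ++ [ca])

theorem levB_spec (a b : List Char) (cap : Int) :
    (pyLev_b a b cap ≤ cap → pyLev_b a b cap = Lsp a b)
    ∧ (Lsp a b ≤ cap → pyLev_b a b cap = Lsp a b) := by
  unfold pyLev_b
  dsimp only
  split_ifs with hpre
  · have hge := levN_ge_sub a.reverse b.reverse
    simp only [List.length_reverse] at hge
    have : cap < Lsp a b := by unfold Lsp; omega
    exact ⟨fun h => absurd h (by omega), fun h => absurd h (by omega)⟩
  · have hinit : PySem.List.pyRange 0 ((b.length : Int) + 1) 1 = rowL [] [] b := by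
      rw [rowL_nil_left b []]; norm_num
    rw [hinit]
    simpa using loopB_spec cap b a []

-- A-side: the index-assignment inner loop fills in the next DP row
theorem set_append_length {α : Type} (v y : α) : ∀ (X ys : List α),
    (X ++ y :: ys).set X.length v = X ++ v :: ys := by
  intro X
  induction X with
  | nil => simp
  | cons x xs ih => intro ys; simp [ih]

theorem innerA_spec (b p : List Char) (ca : Char) :
    ∀ (b2 q : List Char), b = q ++ b2 →
      (PySem.List.enumerate b2 ((q.length : Int) + 1)).foldl
        (fun curr jcb =>
          PySem.List.pySetD curr jcb.1
            (min (PySem.List.pyGetD (rowL p [] b) jcb.1 0 + 1)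
              (min (PySem.List.pyGetD curr (jcb.1 - 1) 0 + 1)
                (PySem.List.pyGetD (rowL p [] b) (jcb.1 - 1) 0 + (if ca ≠ jcb.2 then 1 else 0)))))
        (rowL (p ++ [ca]) [] q ++ List.replicate b2.length 0)
      = rowL (p ++ [ca]) [] b := by
  intro b2
  induction b2 with
  | nil =>
    intro q hb
    simp only [PySem.List.enumerate_nil, List.foldl_nil, List.length_nil, List.replicate_zero,
      List.append_nil]
    rw [hb, List.append_nil]
  | cons cb bs2 ih =>
    intro q hb
    rw [PySem.List.enumerate_cons, List.foldl_cons]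
    have hjq : ((q.length : Int) + 1) = ((q.length + 1 : Nat) : Int) := by push_cast; ring
    have hlen : q.length + 1 ≤ b.length := by rw [hb]; simp
    have hup : PySem.List.pyGetD (rowL p [] b) ((q.length : Int) + 1) 0 = Lsp p (q ++ [cb]) := by
      rw [hjq, PySem.List.pyGetD_natCast, rowL_getD p b [] (q.length + 1) hlen, hb]
      rw [List.take_append, List.take_of_length_le (by omega)]
      simp
    have hdiag : PySem.List.pyGetD (rowL p [] b) ((q.length : Int) + 1 - 1) 0 = Lsp p q := by
      have he : ((q.length : Int) + 1 - 1) = ((q.length : Nat) : Int) := by ring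
      rw [he, PySem.List.pyGetD_natCast,
        rowL_getD p b [] q.length (by rw [hb]; simp), hb]
      simp
    have hXlen : (rowL (p ++ [ca]) [] q).length = q.length + 1 := length_rowL (p ++ [ca]) q []
    have hcurr : PySem.List.pyGetD
        (rowL (p ++ [ca]) [] q ++ List.replicate (cb :: bs2).length 0)
        ((q.length : Int) + 1 - 1) 0 = Lsp (p ++ [ca]) q := by
      have he : ((q.length : Int) + 1 - 1) = ((q.length : Nat) : Int) := by ring
      rw [he, PySem.List.pyGetD_natCast, List.getD_append _ _ _ _ (by omega),
        rowL_getD (p ++ [ca]) q [] q.length (le_refl _)]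
      simp
    dsimp only
    rw [hup, hdiag, hcurr, ← Lsp_snoc_snoc p q ca cb, hjq, PySem.List.pySetD_natCast]
    have hset : (rowL (p ++ [ca]) [] q ++ List.replicate (cb :: bs2).length 0).set
        (q.length + 1) (Lsp (p ++ [ca]) (q ++ [cb]))
        = rowL (p ++ [ca]) [] (q ++ [cb]) ++ List.replicate bs2.length 0 := by
      rw [List.length_cons, List.replicate_succ, ← hXlen, set_append_length,
        rowL_snoc (p ++ [ca]) q [] cb]
      simp
    rw [hset]
    have hb' : b = (q ++ [cb]) ++ bs2 := by rw [hb]; simp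
    have hidx : (((q.length + 1 : Nat)) : Int) + 1 = (((q ++ [cb]).length : Nat) : Int) + 1 := by
      simp
    rw [hidx]
    exact ih (q ++ [cb]) hb'

theorem outerA_spec (b : List Char) :
    ∀ (as_ p : List Char),
      (PySem.List.enumerate as_ ((p.length : Int) + 1)).foldl
        (fun prev ica =>
          (PySem.List.enumerate b 1).foldl (fun curr jcb =>
            PySem.List.pySetD curr jcb.1
              (min (PySem.List.pyGetD prev jcb.1 0 + 1)
                (min (PySem.List.pyGetD curr (jcb.1 - 1) 0 + 1)
                  (PySem.List.pyGetD prev (jcb.1 - 1) 0 + (if ica.2 ≠ jcb.2 then 1 else 0)))))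
            (ica.1 :: List.replicate b.length 0))
        (rowL p [] b)
      = rowL (p ++ as_) [] b := by
  intro as_
  induction as_ with
  | nil => intro p; simp [PySem.List.enumerate_nil]
  | cons ca rest ih =>
    intro p
    rw [PySem.List.enumerate_cons, List.foldl_cons]
    have hcurr0 : ((p.length : Int) + 1) :: List.replicate b.length 0
        = rowL (p ++ [ca]) [] [] ++ List.replicate b.length 0 := by
      simp only [rowL, Lsp_nil_right, List.length_append, List.length_cons, List.length_nil]
      push_cast
      ring_nf
      rw [List.singleton_append]
    have hinner := innerA_spec b p ca b [] (by simp)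
    simp only [List.length_nil, Nat.cast_zero, zero_add] at hinner
    dsimp only
    rw [hcurr0, hinner]
    have hidx : (p.length : Int) + 1 + 1 = (((p ++ [ca]).length : Nat) : Int) + 1 := by
      push_cast [List.length_append, List.length_cons, List.length_nil]; ring
    rw [hidx, ih (p ++ [ca])]
    congr 1
    simp

theorem levA_eq (a b : List Char) : pyLev_a a b = Lsp a b := by
  unfold pyLev_a
  dsimp only
  split_ifs with h1 h2 h3
  · rw [h1, Lsp_self]
  · have ha : a = [] := by
      have : a.length = 0 := by exact_mod_cast h2
      simpa [List.length_eq_zero_iff] using this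
    rw [ha, Lsp_nil_left]
  · have hbnil : b = [] := by
      have : b.length = 0 := by exact_mod_cast h3
      simpa [List.length_eq_zero_iff] using this
    rw [hbnil, Lsp_nil_right]
  · have hinit : PySem.List.pyRange 0 ((b.length : Int) + 1) 1 = rowL [] [] b := by
      rw [rowL_nil_left b []]; norm_num
    rw [hinit]
    have houter := outerA_spec b a []
    simp only [List.length_nil, Nat.cast_zero, zero_add, List.nil_append] at houter
    rw [houter, PySem.List.pyGetD_natCast, rowL_getD a b [] b.length (le_refl _)]
    simp

theorem dist_agree (a b : List Char) (cap : Int) :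
    (pyLev_a a b ≤ cap ↔ pyLev_b a b cap ≤ cap)
    ∧ (pyLev_a a b ≤ cap → pyLev_a a b = pyLev_b a b cap) := by
  have hA := levA_eq a b
  obtain ⟨h1, h2⟩ := levB_spec a b cap
  constructor
  · constructor
    · intro h; rw [hA] at h; rw [h2 h]; exact h
    · intro h; rw [hA, ← h1 h]; exact h
  · intro h; rw [hA] at h ⊢; rw [h2 h]

theorem scored_eq (nl : List Char) (md : Int) :
    ∀ (cands : List String) (acc : List (Int × String)),
      cands.foldl (fun scored c =>
          let d := pyLev_a nl (PySem.Str.lower c).toList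
          if d ≤ md then scored ++ [(d, c)] else scored) acc
        = acc ++ cands.filterMap (fun c =>
          let d := pyLev_b nl (PySem.Str.lower c).toList md
          if d ≤ md then some (d, c) else none) := by
  intro cands
  induction cands with
  | nil => simp
  | cons c cs ih =>
    intro acc
    obtain ⟨hiff, heq⟩ := dist_agree nl (PySem.Str.lower c).toList md
    simp only [List.foldl_cons, List.filterMap_cons]
    by_cases h : pyLev_a nl (PySem.Str.lower c).toList ≤ md
    · rw [if_pos h, if_pos (hiff.mp h), ih, heq h]
      simp
    · rw [if_neg h, if_neg (fun hb => h (hiff.mpr hb)), ih]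

-- ===== VERDICT (by name: the statement is the Claim_ definition above) =====
theorem ranked_candidates_py_spec : Claim_equal_ranked_candidates_py := by
  intro name candidates max_dist n _
  unfold Spec_ranked_candidates_py ranked_candidates_py ranked_candidates_py_alt
  dsimp only
  rw [scored_eq (PySem.Str.lower name).toList max_dist candidates []]
  simp
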